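-- pv_equiv track=rewrite | github.com/PinoEdu/INF-129 | Preparacion-C1/C1_2021_1/P2-b.py | votos_partido
-- ===== SOURCE A (Python) =====
-- def votos_partido(votos, partido):
--     contador = 0
--     p = "" # Creamos una variable auxiliar para ir concatenando los caracteres correspondiente a un voto
--     for caracter in votos:
--         if caracter != "$":
--             p += caracter
--         else:
--             if p == partido:
--                 contador += 1
--             p = ""  # Reiniciamos la variable auxiliar para pasar a otro voto
--
--     if p == partido:
--         contador += 1
--
--     return contador
-- ===== SOURCE B (Python) =====
-- def votos_partido(votos, partido):
--     return votos.split("$").count(partido)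
-- ===== Notes on version B (the rewrite author's own statement) =====
-- stated objective: idiomatic
-- what changed: Replaces the manual character-accumulation loop and trailing-segment check with split('$') followed by list.count, turning one streaming pass with mutable state into a build-then-count pipeline.
import Mathlib
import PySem

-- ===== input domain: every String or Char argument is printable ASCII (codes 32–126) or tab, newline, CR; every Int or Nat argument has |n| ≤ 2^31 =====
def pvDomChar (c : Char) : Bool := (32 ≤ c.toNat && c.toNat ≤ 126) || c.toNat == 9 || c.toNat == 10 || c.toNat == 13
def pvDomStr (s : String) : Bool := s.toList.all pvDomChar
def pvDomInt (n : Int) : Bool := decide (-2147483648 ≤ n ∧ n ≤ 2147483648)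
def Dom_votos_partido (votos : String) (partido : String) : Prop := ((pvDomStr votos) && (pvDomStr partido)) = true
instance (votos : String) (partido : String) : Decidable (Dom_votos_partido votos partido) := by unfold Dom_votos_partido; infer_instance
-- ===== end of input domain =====

-- B replaces A's manual character-accumulation loop with split("$") followed by list.count (idiomatic; same O(n) cost).


-- ===== PORT A =====
-- Port of A: fold over the characters with state (contador, p); p kept as List Char
-- (the PySem convention for building up a Python str character by character).
def votos_partido (votos : String) (partido : String) : Int :=
  let st := votos.toList.foldl
    (fun (st : Int × List Char) (caracter : Char) =>
      if caracter ≠ '$' then (st.1, st.2 ++ [caracter])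
      else (if st.2 = partido.toList then st.1 + 1 else st.1, ([] : List Char)))
    (0, [])
  if st.2 = partido.toList then st.1 + 1 else st.1

-- ===== PORT B =====
-- Port of B: votos.split("$").count(partido)
def votos_partido_alt (votos : String) (partido : String) : Int :=
  ((PySem.Chars.splitOn votos.toList "$".toList).count partido.toList : Int)

-- ===== PRECONDITION & SPEC =====
def Spec_votos_partido (votos : String) (partido : String) (out : Int) : Prop := out = votos_partido_alt votos partido
instance (votos : String) (partido : String) (out : Int) : Decidable (Spec_votos_partido votos partido out) := by unfold Spec_votos_partido; infer_instance

-- ===== CLAIM (what is proved, stated in full; the proofs are below) =====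
def Claim_equal_votos_partido : Prop := ∀ (votos : String) (partido : String), Dom_votos_partido votos partido → Spec_votos_partido votos partido (votos_partido votos partido)

-- ===== LEMMAS AND PROOFS =====

-- A simple structural recursion computing split on a single-character separator.
def mySplit (d : Char) : List Char → List (List Char)
  | [] => [[]]
  | c :: r =>
    let s := mySplit d r
    if c = d then [] :: s else (c :: s.headI) :: s.tail

theorem mySplit_ne_nil (d : Char) (l : List Char) : mySplit d l ≠ [] := by
  cases l <;> simp [mySplit] <;> split <;> simp

theorem mySplit_cons_head_tail (d : Char) (l : List Char) :
    mySplit d l = (mySplit d l).headI :: (mySplit d l).tail := by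
  cases h : mySplit d l with
  | nil => exact absurd h (mySplit_ne_nil d l)
  | cons a t => simp

theorem go_single (d : Char) :
    ∀ (fuel : Nat) (l cur : List Char) (acc : List (List Char)), l.length < fuel →
      PySem.Chars.splitOn.go [d] fuel l cur acc =
        acc.reverse ++ (cur.reverse ++ (mySplit d l).headI) :: (mySplit d l).tail := by
  intro fuel
  induction fuel with
  | zero => intro l cur acc h; omega
  | succ n ih =>
    intro l cur acc h
    cases l with
    | nil => simp [PySem.Chars.splitOn.go, mySplit]
    | cons c rest =>
      by_cases hc : c = d
      · subst hc
        rw [PySem.Chars.splitOn.go]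
        have hp : List.isPrefixOf [c] (c :: rest) = true := by simp [List.isPrefixOf]
        rw [if_pos hp]
        have := ih rest [] (cur.reverse :: acc) (by simp at h; omega)
        refine Eq.trans this ?_
        simp [mySplit]
        exact (mySplit_cons_head_tail c rest).symm
      · rw [PySem.Chars.splitOn.go]
        have hp : List.isPrefixOf [d] (c :: rest) = false := by
          simp [List.isPrefixOf]
          exact fun hh => absurd hh.symm hc
        rw [if_neg (by simp [hp])]
        rw [ih rest (c :: cur) acc (by simpa using Nat.lt_of_succ_lt_succ h)]
        simp [mySplit, hc]

theorem splitOn_eq_mySplit (d : Char) (l : List Char) :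
    PySem.Chars.splitOn l [d] = mySplit d l := by
  have := go_single d (l.length + 1) l [] [] (by omega)
  rw [PySem.Chars.splitOn, this]
  simp
  exact (mySplit_cons_head_tail d l).symm

theorem loop_count (P : List Char) (d : Char) :
    ∀ (cs : List Char) (p : List Char) (acc : Int),
      (if (cs.foldl
        (fun (st : Int × List Char) (c : Char) =>
          if c ≠ d then (st.1, st.2 ++ [c])
          else (if st.2 = P then st.1 + 1 else st.1, ([] : List Char)))
        (acc, p)).2 = P
       then (cs.foldl
        (fun (st : Int × List Char) (c : Char) =>
          if c ≠ d then (st.1, st.2 ++ [c])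
          else (if st.2 = P then st.1 + 1 else st.1, ([] : List Char)))
        (acc, p)).1 + 1
       else (cs.foldl
        (fun (st : Int × List Char) (c : Char) =>
          if c ≠ d then (st.1, st.2 ++ [c])
          else (if st.2 = P then st.1 + 1 else st.1, ([] : List Char)))
        (acc, p)).1)
      = acc + (((p ++ (mySplit d cs).headI) :: (mySplit d cs).tail).count P : Int) := by
  intro cs
  induction cs with
  | nil =>
    intro p acc
    simp [mySplit, List.count_cons]
    split <;> simp_all
  | cons c rest ih =>
    intro p acc
    by_cases hc : c = d
    · subst hc
      simp only [List.foldl_cons, ne_eq, not_true_eq_false, if_false]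
      rw [ih [] (if p = P then acc + 1 else acc)]
      simp [mySplit, List.count_cons, ← mySplit_cons_head_tail]
      split <;> simp_all <;> ring
    · simp only [List.foldl_cons, ne_eq, hc, not_false_eq_true, if_true, if_pos]
      rw [ih (p ++ [c])]
      simp [mySplit, hc]

-- ===== VERDICT (by name: the statement is the Claim_ definition above) =====
theorem votos_partido_spec : Claim_equal_votos_partido := by
  intro votos partido _
  unfold Spec_votos_partido votos_partido votos_partido_alt
  have hs : "$".toList = ['$'] := rfl
  rw [hs, splitOn_eq_mySplit]
  rw [mySplit_cons_head_tail '$' votos.toList]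
  have := loop_count partido.toList '$' votos.toList [] 0
  simp only [List.nil_append] at this
  simpa using this
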